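-- pv_equiv track=rewrite | github.com/mcao516/MiRNN | model/data_utils.py | create_window
-- ===== SOURCE A (Python) =====
-- def create_window(sequence, window_size):
--     """Create window for a giving sequence
--
--     Args:
--         sequence: list of data
--         window_size: size of the window, int
--     """
--     windowed_seq = []
--     assert len(sequence) > 2*window_size
--     # for item in sequence[window_size, -window_size]:
--     if window_size == 0:
--         return [[i] for i in sequence]
--     else:
--         for i in range(len(sequence))[window_size: -window_size]:
--             neighbors = [i - window_size + j for j in range(2*window_size + 1)]
--             windowed_seq.append([sequence[nindex] for nindex in neighbors])
--         return windowed_seq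
-- ===== SOURCE B (Python) =====
-- def create_window(sequence, window_size):
--     """Create window for a giving sequence
--
--     Args:
--         sequence: list of data
--         window_size: size of the window, int
--     """
--     assert len(sequence) > 2 * window_size
--     return [sequence[i - window_size : i + window_size + 1]
--             for i in range(len(sequence))[window_size : -window_size or None]]
-- ===== Notes on version B (the rewrite author's own statement) =====
-- stated objective: idiomatic
-- what changed: A builds each window by first materialising a neighbor-index list and gathering sequence[nindex] one element at a time into an accumulator list; B is a single comprehension that slices each window directly out of the sequence (sequence[i-w:i+w+1]), with the slice bound '-window_size or None' subsuming A's special window_size==0 branch.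
import Mathlib
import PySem

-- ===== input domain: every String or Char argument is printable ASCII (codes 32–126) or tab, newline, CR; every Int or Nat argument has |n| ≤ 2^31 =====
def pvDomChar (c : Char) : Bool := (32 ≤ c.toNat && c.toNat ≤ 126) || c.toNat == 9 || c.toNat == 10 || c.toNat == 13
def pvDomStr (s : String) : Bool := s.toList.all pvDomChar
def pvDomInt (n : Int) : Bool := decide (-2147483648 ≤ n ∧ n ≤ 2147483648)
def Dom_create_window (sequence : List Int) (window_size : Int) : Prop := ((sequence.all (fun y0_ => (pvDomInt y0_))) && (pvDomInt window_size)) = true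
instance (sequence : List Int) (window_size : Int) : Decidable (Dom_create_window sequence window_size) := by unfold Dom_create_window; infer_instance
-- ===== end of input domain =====

-- B replaces A's accumulator loop that gathers each window element-by-element from a computed
-- neighbor-index list with a single comprehension slicing each window directly (idiomatic).

-- ===== PORT A =====
def create_window (sequence : List Int) (window_size : Int) : List (List Int) :=
  -- windowed_seq = []; assert len(sequence) > 2*window_size  (assert: Pre_ below)
  if window_size = 0 then
    -- return [[i] for i in sequence]
    sequence.map (fun i => [i])
  else
    -- for i in range(len(sequence))[window_size: -window_size]: … windowed_seq.append(…)
    (PySem.List.slice (PySem.List.pyRange 0 (sequence.length : Int) 1)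
        (some window_size) (some (-window_size))).foldl
      (fun windowed_seq i =>
        -- neighbors = [i - window_size + j for j in range(2*window_size + 1)]
        let neighbors := (PySem.List.pyRange 0 (2 * window_size + 1) 1).map
          (fun j => i - window_size + j)
        -- windowed_seq.append([sequence[nindex] for nindex in neighbors])
        -- sequence[nindex]: in range for every input Pre_ admits (pyGetD exact there)
        windowed_seq ++ [neighbors.map (fun nindex => PySem.List.pyGetD sequence nindex 0)])
      []

-- ===== PORT B =====
def create_window_alt (sequence : List Int) (window_size : Int) : List (List Int) :=
  -- assert len(sequence) > 2*window_size  (Pre_ below)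
  -- [sequence[i-window_size : i+window_size+1] for i in range(len(sequence))[window_size : -window_size or None]]
  (PySem.List.slice (PySem.List.pyRange 0 (sequence.length : Int) 1)
      (some window_size)
      (if -window_size = 0 then none else some (-window_size))).map
    (fun i => PySem.List.slice sequence (some (i - window_size)) (some (i + window_size + 1)))

-- ===== PRECONDITION & SPEC =====
-- Pre_: exactly the inputs on which A's assert passes (A returns on all of them, including
-- negative window_size); on the rest A raises AssertionError.
def Pre_create_window (sequence : List Int) (window_size : Int) : Prop :=
  2 * window_size < (sequence.length : Int)
instance (sequence : List Int) (window_size : Int) : Decidable (Pre_create_window sequence window_size) := by unfold Pre_create_window; infer_instance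

def pvWitness_create_window : List Int × Int := ([5, 6, 7], 1)

def Spec_create_window (sequence : List Int) (window_size : Int) (out : List (List Int)) : Prop := out = create_window_alt sequence window_size
instance (sequence : List Int) (window_size : Int) (out : List (List Int)) : Decidable (Spec_create_window sequence window_size out) := by unfold Spec_create_window; infer_instance

-- ===== CLAIM (what is proved, stated in full; the proofs are below) =====
def Claim_equal_create_window : Prop := ∀ (sequence : List Int) (window_size : Int), Dom_create_window sequence window_size → Pre_create_window sequence window_size → Spec_create_window sequence window_size (create_window sequence window_size)

-- ===== LEMMAS AND PROOFS =====

-- A slice of range(n) is again a range, between the clamped bounds.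
lemma slice_pyRange_eq (n : Nat) (a b : Int) :
    PySem.List.slice (PySem.List.pyRange 0 (n : Int) 1) (some a) (some b)
      = PySem.List.pyRange (PySem.List.clampIdx n a) (PySem.List.clampIdx n b) 1 := by
  have hca := PySem.List.clampIdx_le n a
  have hcb := PySem.List.clampIdx_le n b
  have hlen : (PySem.List.pyRange 0 (n : Int) 1).length = n := by
    rw [PySem.List.length_pyRange_one]; omega
  apply List.ext_getElem
  · rw [PySem.List.length_slice, hlen, PySem.List.length_pyRange_one]
    omega
  · intro k h1 h2
    rw [PySem.List.length_slice, hlen] at h1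
    simp only [PySem.List.slice, List.getElem_take, List.getElem_drop,
      PySem.List.getElem_pyRange_one, hlen]
    push_cast
    omega

-- ===== VERDICT (by name: the statement is the Claim_ definition above) =====
theorem create_window_spec : Claim_equal_create_window := by
  intro seq w _ hpre
  unfold Pre_create_window at hpre
  unfold Spec_create_window create_window create_window_alt
  by_cases hw : w = 0
  · subst hw
    simp only [reduceIte, neg_zero, PySem.List.slice_zero_start, PySem.List.slice_none_none]
    apply List.ext_getElem
    · simp [PySem.List.length_pyRange_one]
    · intro k h1 h2
      have hk : k < seq.length := by simpa [PySem.List.length_pyRange_one] using h2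
      simp only [List.getElem_map, PySem.List.getElem_pyRange_one]
      have h0k : (0 : Int) + (k : Int) - 0 = ((k : Nat) : Int) := by ring
      have h1k : (0 : Int) + (k : Int) + 0 + 1 = ((k + 1 : Nat) : Int) := by push_cast; ring
      rw [h0k, h1k, PySem.List.slice_natCast]
      have hk1 : k + 1 - k = 1 := by omega
      rw [hk1, List.take_one_drop_eq_of_lt_length hk]
      simp
  · rw [if_neg hw, if_neg (by omega : ¬ -w = 0)]
    rw [PySem.List.foldl_append_singleton_eq_map, List.nil_append]
    rw [slice_pyRange_eq]
    apply List.map_congr_left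
    intro i hi
    rw [PySem.List.mem_pyRange_one] at hi
    obtain ⟨hlo, hhi⟩ := hi
    by_cases hwpos : 0 < w
    · -- positive window: both sides are the window of width 2w+1 around i
      have hlo' : w ≤ i := by
        have hc : PySem.List.clampIdx seq.length w = w.toNat := by
          simp only [PySem.List.clampIdx]; split_ifs <;> omega
        rw [hc] at hlo; omega
      have hhi' : i < (seq.length : Int) - w := by
        have hc : PySem.List.clampIdx seq.length (-w) = seq.length - w.toNat := by
          simp only [PySem.List.clampIdx]; split_ifs <;> omega
        rw [hc] at hhi; omega
      rw [PySem.List.slice_of_nonneg seq (by omega) (by omega) (by omega) (by omega)]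
      apply List.ext_getElem
      · simp [PySem.List.length_pyRange_one]; omega
      · intro k h1 h2
        have hk : (k : Int) < 2 * w + 1 := by
          simp [PySem.List.length_pyRange_one] at h1; omega
        simp only [List.getElem_map, PySem.List.getElem_pyRange_one,
          List.getElem_take, List.getElem_drop]
        rw [PySem.List.pyGetD_eq_getElem seq 0 (by omega) (by omega)]
        congr 1
        omega
    · -- negative window (w < 0): A's neighbor range is empty, B's slice is empty
      have hA : PySem.List.pyRange 0 (2 * w + 1) 1 = [] :=
        PySem.List.pyRange_one_eq_nil (by omega)
      rw [hA]
      have hlo' : (seq.length : Int) ≤ i - w := by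
        have hc : (PySem.List.clampIdx seq.length w : Int) ≥ (seq.length : Int) + w := by
          simp only [PySem.List.clampIdx]; split_ifs <;> omega
        by_cases hn : (seq.length : Int) + w < 0
        · have hc0 : PySem.List.clampIdx seq.length w = 0 := by
            simp only [PySem.List.clampIdx]; split_ifs <;> omega
          rw [hc0] at hlo
          have hwn : -w > (seq.length : Int) := by omega
          omega
        · have hc1 : (PySem.List.clampIdx seq.length w : Int) = (seq.length : Int) + w := by
            simp only [PySem.List.clampIdx]; split_ifs <;> omega
          omega
      have hhi' : i + w + 1 ≤ 0 := by
        have hc : (PySem.List.clampIdx seq.length (-w) : Int) ≤ -w := by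
          simp only [PySem.List.clampIdx]; split_ifs <;> omega
        omega
      have hlen0 : (PySem.List.slice seq (some (i - w)) (some (i + w + 1))).length = 0 := by
        rw [PySem.List.length_slice]
        have h1 : PySem.List.clampIdx seq.length (i - w) = seq.length := by
          simp only [PySem.List.clampIdx]; split_ifs <;> omega
        have h2 := PySem.List.clampIdx_le seq.length (i + w + 1)
        omega
      simp [List.eq_nil_of_length_eq_zero hlen0]
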